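-- pv_equiv track=rewrite | github.com/nishant-udgaonkar/mini-go | my_player3.py | choose_preferred_move
-- ===== SOURCE A (Python) =====
-- def choose_preferred_move(moves):
--     ordered_moves = [
--         12, 6, 8, 7, 18,
--         13, 16, 17, 11, 1,
--         3, 5, 9, 15, 19,
--         21, 23, 2, 10, 14,
--         22, 0, 4, 20, 24, -1
--     ]
--
--     for move in ordered_moves:
--         if move in moves:
--             return move
-- ===== SOURCE B (Python) =====
-- def choose_preferred_move(moves):
--     rank = {m: i for i, m in enumerate([
--         12, 6, 8, 7, 18,
--         13, 16, 17, 11, 1,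
--         3, 5, 9, 15, 19,
--         21, 23, 2, 10, 14,
--         22, 0, 4, 20, 24, -1
--     ])}
--     best = None
--     for m in moves:
--         r = rank.get(m)
--         if r is not None and (best is None or r < best[0]):
--             best = (r, m)
--     return best[1] if best is not None else None
-- ===== Notes on version B (the rewrite author's own statement) =====
-- stated objective: alternative
-- what changed: Instead of scanning the fixed priority list and testing each entry for membership in moves, B builds a rank dictionary once and makes a single pass over moves keeping the candidate with the smallest rank.
import Mathlib
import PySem

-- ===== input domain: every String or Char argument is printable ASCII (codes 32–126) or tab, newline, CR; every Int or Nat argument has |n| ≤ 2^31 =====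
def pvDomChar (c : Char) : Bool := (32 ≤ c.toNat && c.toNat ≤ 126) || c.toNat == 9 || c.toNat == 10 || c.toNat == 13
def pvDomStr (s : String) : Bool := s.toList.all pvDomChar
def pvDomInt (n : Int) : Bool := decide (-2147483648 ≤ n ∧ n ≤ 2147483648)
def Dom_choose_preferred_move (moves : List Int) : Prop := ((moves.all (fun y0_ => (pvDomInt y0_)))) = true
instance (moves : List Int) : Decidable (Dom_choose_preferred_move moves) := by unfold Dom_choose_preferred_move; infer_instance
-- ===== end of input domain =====

-- B replaces A's scan of the fixed priority list (a membership test in `moves` per entry)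
-- by a rank dictionary built once and a single pass over `moves` keeping the smallest-rank
-- candidate (objective: alternative).


-- ===== PORT A =====
def pvOrderedA : List Int :=
  [12, 6, 8, 7, 18,
   13, 16, 17, 11, 1,
   3, 5, 9, 15, 19,
   21, 23, 2, 10, 14,
   22, 0, 4, 20, 24, -1]

-- A's loop: `for move in ordered_moves: if move in moves: return move` (falls off the end = None)
def pvFirstIn : List Int → List Int → Option Int
  | [], _ => none
  | m :: rest, moves => if m ∈ moves then some m else pvFirstIn rest moves

def choose_preferred_move (moves : List Int) : Option Int :=
  pvFirstIn pvOrderedA moves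

-- ===== PORT B =====
-- B's `rank = {m: i for i, m in enumerate([...])}`
def pvRank : PySem.Dict Int Int :=
  (PySem.List.enumerate
    [12, 6, 8, 7, 18,
     13, 16, 17, 11, 1,
     3, 5, 9, 15, 19,
     21, 23, 2, 10, 14,
     22, 0, 4, 20, 24, -1]).foldl (fun d p => d.insert p.2 p.1) PySem.Dict.empty

-- body of B's `for m in moves` loop
def pvStep (best : Option (Int × Int)) (m : Int) : Option (Int × Int) :=
  match pvRank.get? m with
  | none => best
  | some r =>
    match best with
    | none => some (r, m)
    | some (br, bm) => if r < br then some (r, m) else some (br, bm)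

def choose_preferred_move_alt (moves : List Int) : Option Int :=
  match moves.foldl pvStep none with
  | none => none
  | some (_, m) => some m

-- ===== PRECONDITION & SPEC =====
def Spec_choose_preferred_move (moves : List Int) (out : Option Int) : Prop := out = choose_preferred_move_alt moves
instance (moves : List Int) (out : Option Int) : Decidable (Spec_choose_preferred_move moves out) := by unfold Spec_choose_preferred_move; infer_instance

-- ===== CLAIM (what is proved, stated in full; the proofs are below) =====
def Claim_equal_choose_preferred_move : Prop := ∀ (moves : List Int), Dom_choose_preferred_move moves → Spec_choose_preferred_move moves (choose_preferred_move moves)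

-- ===== LEMMAS AND PROOFS =====

-- left-biased minimum-by-rank on optional (rank, move) candidates
def pvMerge (a b : Option (Int × Int)) : Option (Int × Int) :=
  match a, b with
  | none, b => b
  | some x, none => some x
  | some (br, bm), some (r, m) => if r < br then some (r, m) else some (br, bm)

def pvCand (m : Int) : Option (Int × Int) := (pvRank.get? m).map (fun r => (r, m))

lemma pvStep_eq_merge (best : Option (Int × Int)) (m : Int) :
    pvStep best m = pvMerge best (pvCand m) := by
  unfold pvStep pvCand pvMerge
  cases pvRank.get? m <;> cases best <;> rfl

-- the same fold, built from the right
def pvG : List Int → Option (Int × Int)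
  | [] => none
  | m :: ms => pvMerge (pvCand m) (pvG ms)

lemma pvMerge_assoc (a b c : Option (Int × Int)) :
    pvMerge (pvMerge a b) c = pvMerge a (pvMerge b c) := by
  rcases a with _ | ⟨ar, am⟩ <;> rcases b with _ | ⟨br, bm⟩ <;> rcases c with _ | ⟨cr, cm⟩ <;>
    simp only [pvMerge] <;> split_ifs <;> (try simp only [pvMerge]) <;> split_ifs <;>
      first | rfl | (exfalso; omega)

lemma pvFoldl_merge (ms : List Int) (acc : Option (Int × Int)) :
    ms.foldl pvStep acc = pvMerge acc (pvG ms) := by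
  induction ms generalizing acc with
  | nil => cases acc <;> rfl
  | cons m ms ih =>
    simp only [List.foldl_cons, pvStep_eq_merge, pvG, ih, pvMerge_assoc]

-- the rank dict pairs each list entry with its position
lemma items_pvRank : pvRank.items = (PySem.List.enumerate pvOrderedA 0).map (fun p => (p.2, p.1)) := by
  decide

lemma nodup_pvRank : pvRank.keys.Nodup := by decide

lemma pvRank_pos (m r : Int) (h : pvRank.get? m = some r) :
    ∃ (k : Nat) (hk : k < pvOrderedA.length), r = (k : Int) ∧ pvOrderedA[k] = m := by
  have hm := PySem.Dict.mem_items_of_get?_eq_some pvRank h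
  rw [items_pvRank] at hm
  obtain ⟨p, hp, hpe⟩ := List.mem_map.mp hm
  obtain ⟨k, hk, rfl⟩ := (PySem.List.mem_enumerate_iff _ _ _).mp hp
  simp only [Prod.mk.injEq] at hpe
  exact ⟨k, hk, by omega, hpe.1⟩

lemma pvRank_at (k : Nat) (hk : k < pvOrderedA.length) :
    pvRank.get? pvOrderedA[k] = some (k : Int) := by
  apply PySem.Dict.get?_of_mem_items pvRank _ nodup_pvRank
  rw [items_pvRank]
  exact List.mem_map.mpr ⟨((k : Int), pvOrderedA[k]),
    (PySem.List.mem_enumerate_iff _ _ _).mpr ⟨k, hk, by simp⟩, rfl⟩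

-- what B's fold computes: nothing rankable, or the minimum-rank candidate
lemma pvG_cases (ms : List Int) :
    (pvG ms = none ∧ ∀ m ∈ ms, pvRank.get? m = none) ∨
    (∃ r x, pvG ms = some (r, x) ∧ pvRank.get? x = some r ∧ x ∈ ms ∧
      ∀ y ∈ ms, ∀ j, pvRank.get? y = some j → r ≤ j) := by
  induction ms with
  | nil => exact Or.inl ⟨rfl, by simp⟩
  | cons m ms ih =>
    rcases hcm : pvRank.get? m with _ | rm
    · rcases ih with ⟨hg, hall⟩ | ⟨r, x, hg, hx, hmem, hmin⟩
      · refine Or.inl ⟨?_, ?_⟩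
        · simp [pvG, pvCand, hcm, hg, pvMerge]
        · intro y hy
          rcases List.mem_cons.mp hy with rfl | hy
          · exact hcm
          · exact hall y hy
      · refine Or.inr ⟨r, x, ?_, hx, List.mem_cons_of_mem _ hmem, ?_⟩
        · simp [pvG, pvCand, hcm, hg, pvMerge]
        · intro y hy j hj
          rcases List.mem_cons.mp hy with rfl | hy
          · simp [hcm] at hj
          · exact hmin y hy j hj
    · rcases ih with ⟨hg, hall⟩ | ⟨r, x, hg, hx, hmem, hmin⟩
      · refine Or.inr ⟨rm, m, ?_, hcm, List.mem_cons_self, ?_⟩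
        · simp [pvG, pvCand, hcm, hg, pvMerge]
        · intro y hy j hj
          rcases List.mem_cons.mp hy with rfl | hy
          · rw [hcm] at hj; simp only [Option.some.injEq] at hj; omega
          · rw [hall y hy] at hj; cases hj
      · by_cases hlt : r < rm
        · refine Or.inr ⟨r, x, ?_, hx, List.mem_cons_of_mem _ hmem, ?_⟩
          · simp [pvG, pvCand, hcm, hg, pvMerge, hlt]
          · intro y hy j hj
            rcases List.mem_cons.mp hy with rfl | hy
            · rw [hcm] at hj; simp only [Option.some.injEq] at hj; omega
            · exact hmin y hy j hj
        · refine Or.inr ⟨rm, m, ?_, hcm, List.mem_cons_self, ?_⟩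
          · simp [pvG, pvCand, hcm, hg, pvMerge, hlt]
          · intro y hy j hj
            rcases List.mem_cons.mp hy with rfl | hy
            · rw [hcm] at hj; simp only [Option.some.injEq] at hj; omega
            · have := hmin y hy j hj; omega

lemma pvFirstIn_eq_find? (ord moves : List Int) :
    pvFirstIn ord moves = List.find? (fun m => decide (m ∈ moves)) ord := by
  induction ord with
  | nil => rfl
  | cons m rest ih => simp only [pvFirstIn, List.find?_cons]; split_ifs <;> simp_all

lemma pvAlt_eq_G (moves : List Int) :
    choose_preferred_move_alt moves =
      match pvG moves with | none => none | some (_, m) => some m := by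
  unfold choose_preferred_move_alt
  rw [pvFoldl_merge]
  rfl

-- ===== VERDICT (by name: the statement is the Claim_ definition above) =====
theorem choose_preferred_move_spec : Claim_equal_choose_preferred_move := by
  intro moves _
  unfold Spec_choose_preferred_move choose_preferred_move
  rw [pvAlt_eq_G, pvFirstIn_eq_find?]
  rcases pvG_cases moves with ⟨hg, hall⟩ | ⟨r, x, hg, hx, hmem, hmin⟩
  · rw [hg]
    simp only [List.find?_eq_none, decide_eq_true_eq]
    intro y hy hmv
    rcases List.mem_iff_getElem.mp hy with ⟨i, hi, rfl⟩
    have hat := pvRank_at i hi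
    rw [hall _ hmv] at hat
    cases hat
  · rw [hg]
    obtain ⟨k, hk, rfl, hkx⟩ := pvRank_pos x r hx
    apply (List.find?_eq_some_iff_getElem).mpr
    refine ⟨by simpa using hmem, k, hk, hkx, ?_⟩
    intro j hj
    simp only [Bool.not_eq_eq_eq_not, Bool.not_true, decide_eq_false_iff_not]
    intro hmemj
    have hat := pvRank_at j (by omega)
    have := hmin _ hmemj _ hat
    omega
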